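-- pv_equiv track=rewrite | github.com/geb2701/ALGORITMOS-Y-ESTRUCTURAS-DE-DATOS-I | Unidad 3 Matrices/Ejercicio 2/GustavoBruno.py | MatrizE
-- ===== SOURCE A (Python) =====
-- def MatrizE(n):
--     nuevaMatriz = []
--     poner = False
--     valor = 0
--     for i in range (n):
--         nuevaMatriz.append([])
--         for j in range (n):
--             if poner:
--                 valor += 1
--                 nuevaMatriz[i].append(valor)
--                 poner = False
--             else:
--                 nuevaMatriz[i].append(0)
--                 poner = True
--         if poner:
--             poner = False
--         else:
--             poner = True
--     return nuevaMatriz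
-- ===== SOURCE B (Python) =====
-- def MatrizE(n):
--     half = n // 2
--     return [
--         [
--             (i * half + ((j + 1) // 2 if (i * (n + 1)) % 2 == 0 else j // 2 + 1))
--             if (i * (n + 1) + j) % 2 == 1 else 0
--             for j in range(n)
--         ]
--         for i in range(n)
--     ]
-- ===== Notes on version B (the rewrite author's own statement) =====
-- stated objective: alternative
-- what changed: Replaces A's stateful double loop with a running 'poner' toggle and 'valor' counter by a closed-form per-cell formula: cell (i,j) is colored iff (i*(n+1)+j) is odd and its value is i*(n//2) plus the 1-based position of the colored cell within its row, computed directly from the indices.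
import Mathlib
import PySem

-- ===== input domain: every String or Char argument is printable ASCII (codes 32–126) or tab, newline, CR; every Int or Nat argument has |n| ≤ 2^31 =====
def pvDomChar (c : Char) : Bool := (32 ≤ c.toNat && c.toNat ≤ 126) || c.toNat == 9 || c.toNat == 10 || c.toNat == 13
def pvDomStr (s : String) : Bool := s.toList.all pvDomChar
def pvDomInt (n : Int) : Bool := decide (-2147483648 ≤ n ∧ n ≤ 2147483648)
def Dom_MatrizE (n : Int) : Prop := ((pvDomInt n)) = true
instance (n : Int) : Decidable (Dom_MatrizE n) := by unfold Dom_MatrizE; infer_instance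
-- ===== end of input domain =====

-- B replaces A's running `poner` toggle and `valor` counter by a closed-form
-- per-cell formula computed from the indices alone (objective: alternative).

-- ===== PORT A =====
-- inner loop body: one cell of a row (state: row so far, poner, valor)
def pvInnerStep (p : List Int × Bool × Int) (_j : Int) : List Int × Bool × Int :=
  if p.2.1 then (p.1 ++ [p.2.2 + 1], false, p.2.2 + 1)
  else (p.1 ++ [(0 : Int)], true, p.2.2)

-- outer loop body: one row (state: matrix so far, poner, valor)
def pvOuterStep (n : Int) (st : List (List Int) × Bool × Int) (_i : Int) :
    List (List Int) × Bool × Int :=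
  let inner := (PySem.List.pyRange 0 n 1).foldl pvInnerStep ([], st.2.1, st.2.2)
  (st.1 ++ [inner.1], if inner.2.1 then false else true, inner.2.2)

def MatrizE (n : Int) : List (List Int) :=
  ((PySem.List.pyRange 0 n 1).foldl (pvOuterStep n) ([], false, 0)).1

-- ===== PORT B =====
-- one cell, computed in closed form from its indices (Source B's conditional expression)
def pvBCell (n i j : Int) : Int :=
  if PySem.Int.mod (i * (n + 1) + j) 2 = 1 then
    i * PySem.Int.floordiv n 2 +
      (if PySem.Int.mod (i * (n + 1)) 2 = 0
        then PySem.Int.floordiv (j + 1) 2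
        else PySem.Int.floordiv j 2 + 1)
  else 0

def MatrizE_alt (n : Int) : List (List Int) :=
  (PySem.List.pyRange 0 n 1).map (fun i => (PySem.List.pyRange 0 n 1).map (pvBCell n i))

-- ===== PRECONDITION & SPEC =====
def Spec_MatrizE (n : Int) (out : List (List Int)) : Prop := out = MatrizE_alt n
instance (n : Int) (out : List (List Int)) : Decidable (Spec_MatrizE n out) := by unfold Spec_MatrizE; infer_instance

-- ===== CLAIM (what is proved, stated in full; the proofs are below) =====
def Claim_equal_MatrizE : Prop := ∀ (n : Int), Dom_MatrizE n → Spec_MatrizE n (MatrizE n)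


-- ===== LEMMAS AND PROOFS =====

-- number of colored cells among the first m cells of a row entered with toggle p
def pvCnt (p : Bool) (m : Nat) : Int := if p then (((m + 1) / 2 : Nat) : Int) else ((m / 2 : Nat) : Int)

-- value A writes into cell j of a row entered with toggle p and counter v
def pvCell (p : Bool) (v : Int) (j : Nat) : Int :=
  if p != decide (j % 2 = 1) then v + pvCnt p (j + 1) else 0

-- A's toggle at the start of row i
def pvP (n : Int) (i : Nat) : Bool := decide (PySem.Int.mod ((i : Int) * (n + 1)) 2 = 1)

-- A's counter at the start of row i
def pvV (n : Int) (i : Nat) : Int := (i : Int) * PySem.Int.floordiv n 2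

lemma pvDecide_succ (m : Nat) : decide ((m + 1) % 2 = 1) = !decide (m % 2 = 1) := by
  by_cases hm : m % 2 = 1
  · have h1 : (m + 1) % 2 = 0 := by omega
    simp [hm, h1]
  · have h1 : (m + 1) % 2 = 1 := by omega
    simp [hm, h1]

lemma pvCell_shift (p : Bool) (v : Int) (j : Nat) :
    pvCell p v (j + 1) = pvCell (!p) (if p then v + 1 else v) j := by
  rcases p <;> by_cases hj : j % 2 = 1 <;>
    · simp [pvCell, pvCnt, pvDecide_succ, hj]
      try omega

lemma pvCnt_shift (p : Bool) (m : Nat) :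
    pvCnt p (m + 1) = (if p then 1 else 0) + pvCnt (!p) m := by
  rcases p <;> · simp [pvCnt]
                 try omega

lemma pv_inner (l : List Int) : ∀ (p : Bool) (v : Int) (acc : List Int),
    l.foldl pvInnerStep (acc, p, v)
      = (acc ++ (List.range l.length).map (pvCell p v),
         p != decide (l.length % 2 = 1), v + pvCnt p l.length) := by
  induction l with
  | nil => intro p v acc; simp [pvCnt]
  | cons x l ih =>
    intro p v acc
    have hstep : pvInnerStep (acc, p, v) x
        = (acc ++ [pvCell p v 0], !p, if p then v + 1 else v) := by
      rcases p <;> simp [pvInnerStep, pvCell, pvCnt]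
    rw [List.foldl_cons, hstep, ih]
    refine Prod.ext ?_ (Prod.ext ?_ ?_)
    · rw [List.length_cons, List.range_succ_eq_map, List.map_cons, List.map_map,
        List.append_assoc, List.singleton_append]
      refine congrArg (acc ++ ·) ?_
      refine congrArg₂ List.cons rfl ?_
      exact List.map_congr_left fun j _ => (pvCell_shift p v j).symm
    · rw [List.length_cons, pvDecide_succ]
      generalize decide (l.length % 2 = 1) = d
      cases p <;> cases d <;> rfl
    · rw [List.length_cons, pvCnt_shift]
      rcases p <;> · simp
                     try omega

lemma pv_cell_eq (n : Int) (i j : Nat) :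
    pvCell (pvP n i) (pvV n i) j = pvBCell n (i : Int) (j : Int) := by
  have h2 : (0 : Int) < 2 := by omega
  simp only [pvCell, pvCnt, pvP, pvV, pvBCell,
    PySem.Int.mod_eq_emod_of_pos h2, PySem.Int.floordiv_eq_ediv_of_pos h2]
  rcases Int.emod_two_eq ((i : Int) * (n + 1)) with h | h <;> by_cases hj : j % 2 = 1
  · have hc : ((i : Int) * (n + 1) + (j : Int)) % 2 = 1 := by omega
    simp [h, hj, hc]
  · have hc : ¬ ((i : Int) * (n + 1) + (j : Int)) % 2 = 1 := by omega
    simp [h, hj, hc]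
  · have hc : ¬ ((i : Int) * (n + 1) + (j : Int)) % 2 = 1 := by omega
    simp [h, hj, hc]
  · have hc : ((i : Int) * (n + 1) + (j : Int)) % 2 = 1 := by omega
    simp [h, hj, hc]
    omega

lemma pv_outer (n : Int) (hn : 0 < n) (l : List Int) :
    ∀ (i : Nat) (acc : List (List Int)),
    l.foldl (pvOuterStep n) (acc, pvP n i, pvV n i)
      = (acc ++ (List.range l.length).map
            (fun t => (PySem.List.pyRange 0 n 1).map (pvBCell n ((i + t : Nat) : Int))),
         pvP n (i + l.length), pvV n (i + l.length)) := by
  have h2 : (0 : Int) < 2 := by omega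
  have hN : ((n.toNat : Int)) = n := by omega
  induction l with
  | nil => intro i acc; simp
  | cons x l ih =>
    intro i acc
    have hlen : (PySem.List.pyRange 0 n 1).length = n.toNat := by
      simp [PySem.List.length_pyRange_one]
    have hfold := pv_inner (PySem.List.pyRange 0 n 1) (pvP n i) (pvV n i) []
    rw [hlen] at hfold
    simp only [List.nil_append] at hfold
    have hrow : (List.range n.toNat).map (pvCell (pvP n i) (pvV n i))
        = (PySem.List.pyRange 0 n 1).map (pvBCell n (i : Int)) := by
      rw [PySem.List.pyRange_zero, List.map_map]
      exact List.map_congr_left fun j _ => pv_cell_eq n i j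
    have hkey : ((i + 1 : Nat) : Int) * (n + 1) = (i : Int) * (n + 1) + (n + 1) := by
      push_cast; ring
    have hparity : (if (pvP n i != decide (n.toNat % 2 = 1)) = true then false else true)
        = pvP n (i + 1) := by
      simp only [pvP, PySem.Int.mod_eq_emod_of_pos h2, hkey]
      generalize (i : Int) * (n + 1) = Q
      rcases Int.emod_two_eq Q with hp | hp <;> by_cases hN2 : n.toNat % 2 = 1
      · have hq' : (Q + (n + 1)) % 2 = 0 := by omega
        simp [hp, hN2, hq']
      · have hq' : (Q + (n + 1)) % 2 = 1 := by omega
        simp [hp, hN2, hq']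
      · have hq' : (Q + (n + 1)) % 2 = 1 := by omega
        simp [hp, hN2, hq']
      · have hq' : (Q + (n + 1)) % 2 = 0 := by omega
        simp [hp, hN2, hq']
    have hne : ((i : Int) * (n + 1)) % 2 = 1 → n % 2 = 0 := by
      intro h1
      rcases Int.emod_two_eq n with h0 | h0
      · exact h0
      · exfalso
        have hd : (2 : Int) ∣ (n + 1) := by omega
        have hd2 : (2 : Int) ∣ (i : Int) * (n + 1) := hd.mul_left _
        omega
    have hcnt : pvV n i + pvCnt (pvP n i) n.toNat = pvV n (i + 1) := by
      have hkey2 : pvCnt (pvP n i) n.toNat = PySem.Int.floordiv n 2 := by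
        simp only [pvP, pvCnt, PySem.Int.mod_eq_emod_of_pos h2,
          PySem.Int.floordiv_eq_ediv_of_pos h2]
        rcases Int.emod_two_eq ((i : Int) * (n + 1)) with hp | hp
        · simp [hp]; omega
        · have hn2 := hne hp
          simp [hp]; omega
      rw [hkey2]
      simp only [pvV]
      push_cast; ring
    have hstep : pvOuterStep n (acc, pvP n i, pvV n i) x
        = (acc ++ [(PySem.List.pyRange 0 n 1).map (pvBCell n (i : Int))],
           pvP n (i + 1), pvV n (i + 1)) := by
      simp only [pvOuterStep]
      rw [hfold]
      refine Prod.ext ?_ (Prod.ext ?_ ?_)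
      · simpa using hrow
      · simpa using hparity
      · simpa using hcnt
    rw [List.foldl_cons, hstep, ih]
    have harg : ∀ t : Nat, i + 1 + t = i + (t + 1) := fun t => by omega
    refine Prod.ext ?_ (Prod.ext ?_ ?_)
    · rw [List.length_cons, List.range_succ_eq_map, List.map_cons, List.map_map,
        List.append_assoc, List.singleton_append]
      refine congrArg (acc ++ ·) ?_
      refine congrArg₂ List.cons (by simp) ?_
      exact List.map_congr_left fun t _ => by
        simp only [Function.comp_apply]
        rw [harg t]
    · simp only [List.length_cons]
      rw [show i + 1 + l.length = i + (l.length + 1) from by omega]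
    · simp only [List.length_cons]
      rw [show i + 1 + l.length = i + (l.length + 1) from by omega]

-- ===== VERDICT (by name: the statement is the Claim_ definition above) =====
theorem MatrizE_spec : Claim_equal_MatrizE := by
  intro n _
  show MatrizE n = MatrizE_alt n
  by_cases hn : 0 < n
  · have h0p : pvP n 0 = false := by
      simp [pvP]
    have h0v : pvV n 0 = 0 := by simp [pvV]
    have h := pv_outer n hn (PySem.List.pyRange 0 n 1) 0 []
    rw [h0p, h0v] at h
    have hlen : (PySem.List.pyRange 0 n 1).length = n.toNat := by
      simp [PySem.List.length_pyRange_one]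
    rw [hlen] at h
    unfold MatrizE
    rw [h]
    simp only [List.nil_append]
    unfold MatrizE_alt
    rw [PySem.List.pyRange_zero, List.map_map]
    exact List.map_congr_left fun t _ => by simp
  · have hnil : PySem.List.pyRange 0 n 1 = [] := by
      rw [PySem.List.pyRange_zero]
      simp [Int.toNat_of_nonpos (by omega : n ≤ 0)]
    simp [MatrizE, MatrizE_alt, hnil]
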